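-- pv_equiv track=rewrite | github.com/tachyon-beep/duskmantle | gateway/graph/service.py | _strip_literals_and_comments
-- ===== SOURCE A (Python) =====
-- def _strip_literals_and_comments(query: str) -> str:
--     result: list[str] = []
--     length = len(query)
--     i = 0
--     while i < length:
--         ch = query[i]
--         if ch in {'"', "'", "`"}:
--             quote = ch
--             result.append(" ")
--             i += 1
--             while i < length:
--                 current = query[i]
--                 if current == "\\" and i + 1 < length:
--                     i += 2
--                     continue
--                 if current == quote:
--                     i += 1
--                     break
--                 i += 1
--             continue
--         if ch == "/" and i + 1 < length:
--             nxt = query[i + 1]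
--             if nxt == "/":
--                 result.append(" ")
--                 i += 2
--                 while i < length and query[i] not in {"\n", "\r"}:
--                     i += 1
--                 continue
--             if nxt == "*":
--                 result.append(" ")
--                 i += 2
--                 while i + 1 < length and not (query[i] == "*" and query[i + 1] == "/"):
--                     i += 1
--                 i = min(length, i + 2)
--                 continue
--         if ch == "-" and i + 1 < length and query[i + 1] == "-":
--             result.append(" ")
--             i += 2
--             while i < length and query[i] not in {"\n", "\r"}:
--                 i += 1
--             continue
--         result.append(ch)
--         i += 1
--     return "".join(result)
-- ===== SOURCE B (Python) =====
-- def _strip_literals_and_comments(query: str) -> str: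
--     NORMAL, STRING, LINE, BLOCK = 0, 1, 2, 3
--     out = []
--     state = NORMAL
--     pending = ""  # a lone "/" or "-" seen in NORMAL, not yet classified
--     quote = ""
--     esc = False
--     star = False
--     for ch in query:
--         if state == NORMAL:
--             if pending == "/":
--                 pending = ""
--                 if ch == "/":
--                     out.append(" ")
--                     state = LINE
--                     continue
--                 if ch == "*":
--                     out.append(" ")
--                     state = BLOCK
--                     star = False
--                     continue
--                 out.append("/")
--             elif pending == "-":
--                 pending = ""
--                 if ch == "-":
--                     out.append(" ")
--                     state = LINE
--                     continue
--                 out.append("-")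
--             if ch in ('"', "'", "`"):
--                 out.append(" ")
--                 state = STRING
--                 quote = ch
--                 esc = False
--             elif ch == "/":
--                 pending = "/"
--             elif ch == "-":
--                 pending = "-"
--             else:
--                 out.append(ch)
--         elif state == STRING:
--             if esc:
--                 esc = False
--             elif ch == "\\":
--                 esc = True
--             elif ch == quote:
--                 state = NORMAL
--         elif state == LINE:
--             if ch in ("\n", "\r"):
--                 out.append(ch)
--                 state = NORMAL
--         else:  # BLOCK
--             if star and ch == "/":
--                 state = NORMAL
--             else:
--                 star = ch == "*"
--     if pending:
--         out.append(pending)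
--     return "".join(out)
-- ===== Notes on version B (the rewrite author's own statement) =====
-- stated objective: alternative
-- what changed: Replaced A's index-jumping scanner with nested skip-while loops by a single for-each-char finite-state machine (NORMAL/STRING/LINE/BLOCK states plus a pending-slash/dash flag and escape flag) that never indexes or looks ahead.
import Mathlib
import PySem

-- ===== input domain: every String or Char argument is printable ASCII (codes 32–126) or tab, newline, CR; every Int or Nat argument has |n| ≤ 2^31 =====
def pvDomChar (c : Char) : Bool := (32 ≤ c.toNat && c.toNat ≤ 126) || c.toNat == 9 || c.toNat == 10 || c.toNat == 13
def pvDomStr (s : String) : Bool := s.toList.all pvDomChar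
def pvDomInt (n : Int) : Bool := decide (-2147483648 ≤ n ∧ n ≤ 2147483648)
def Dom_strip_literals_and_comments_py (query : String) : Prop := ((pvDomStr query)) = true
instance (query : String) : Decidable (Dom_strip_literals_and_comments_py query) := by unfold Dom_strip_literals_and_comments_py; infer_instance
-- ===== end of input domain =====

-- B replaces A's index-jumping scanner (inner skip-while loops, two-char lookahead) by a
-- one-char-at-a-time finite-state machine with a pending-slash/dash flag; same output, same cost.

-- ===== PORT A =====
-- inner while loop skipping a string literal: returns the index after the literal
def aStr (cs : List Char) (q : Char) (i : Nat) : Nat :=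
  if i < cs.length then
    if cs.getD i ' ' = '\\' ∧ i + 1 < cs.length then aStr cs q (i + 2)
    else if cs.getD i ' ' = q then i + 1
    else aStr cs q (i + 1)
  else i
termination_by cs.length - i
decreasing_by
  · exact Nat.sub_lt_sub_left ‹i < cs.length› (Nat.lt_add_of_pos_right (by decide))
  · exact Nat.sub_lt_sub_left ‹i < cs.length› (Nat.lt_add_of_pos_right (by decide))

-- inner while loop skipping to end of line (the newline is not consumed)
def aLine (cs : List Char) (i : Nat) : Nat :=
  if i < cs.length ∧ ¬ (cs.getD i ' ' = '\n' ∨ cs.getD i ' ' = '\r') then aLine cs (i + 1)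
  else i
termination_by cs.length - i
decreasing_by
  exact Nat.sub_lt_sub_left
    ‹i < cs.length ∧ ¬(cs.getD i ' ' = '\n' ∨ cs.getD i ' ' = '\r')›.1
    (Nat.lt_add_of_pos_right (by decide))

-- inner while loop skipping a block comment, then `i = min(length, i + 2)`
def aBlock (cs : List Char) (i : Nat) : Nat :=
  if i + 1 < cs.length ∧ ¬ (cs.getD i ' ' = '*' ∧ cs.getD (i + 1) ' ' = '/') then aBlock cs (i + 1)
  else min cs.length (i + 2)
termination_by cs.length - i
decreasing_by
  exact Nat.sub_lt_sub_left
    (Nat.lt_of_succ_lt ‹i + 1 < cs.length ∧ ¬(cs.getD i ' ' = '*' ∧ cs.getD (i + 1) ' ' = '/')›.1)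
    (Nat.lt_add_of_pos_right (by decide))

theorem aStr_ge (cs : List Char) (q : Char) (i : Nat) : i ≤ aStr cs q i := by
  induction i using aStr.induct cs q with
  | case1 i h h2 ih => rw [aStr, if_pos h, if_pos h2]; omega
  | case2 i h h2 h3 => rw [aStr, if_pos h, if_neg h2, if_pos h3]; omega
  | case3 i h h2 h3 ih => rw [aStr, if_pos h, if_neg h2, if_neg h3]; omega
  | case4 i h => rw [aStr, if_neg h]

theorem aLine_ge (cs : List Char) (i : Nat) : i ≤ aLine cs i := by
  induction i using aLine.induct cs with
  | case1 i h ih => rw [aLine, if_pos h]; omega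
  | case2 i h => rw [aLine, if_neg h]

theorem aBlock_ge (cs : List Char) (i : Nat) : min cs.length i ≤ aBlock cs i := by
  induction i using aBlock.induct cs with
  | case1 i h ih => rw [aBlock, if_pos h]; omega
  | case2 i h => rw [aBlock, if_neg h]; omega

-- main while loop of A; `acc` is the `result` list (single characters / single spaces)
def aMain (cs : List Char) (i : Nat) (acc : List Char) : List Char :=
  if i < cs.length then
    if cs.getD i ' ' = '"' ∨ cs.getD i ' ' = '\'' ∨ cs.getD i ' ' = '`' then
      aMain cs (aStr cs (cs.getD i ' ') (i + 1)) (acc ++ [' '])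
    else if cs.getD i ' ' = '/' ∧ i + 1 < cs.length then
      if cs.getD (i + 1) ' ' = '/' then aMain cs (aLine cs (i + 2)) (acc ++ [' '])
      else if cs.getD (i + 1) ' ' = '*' then aMain cs (aBlock cs (i + 2)) (acc ++ [' '])
      else aMain cs (i + 1) (acc ++ [cs.getD i ' '])
    else if cs.getD i ' ' = '-' ∧ i + 1 < cs.length ∧ cs.getD (i + 1) ' ' = '-' then
      aMain cs (aLine cs (i + 2)) (acc ++ [' '])
    else aMain cs (i + 1) (acc ++ [cs.getD i ' '])
  else acc
termination_by cs.length - i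
decreasing_by
  · exact Nat.sub_lt_sub_left ‹i < cs.length›
      (Nat.lt_of_lt_of_le (Nat.lt_succ_self i) (aStr_ge cs (cs.getD i ' ') (i + 1)))
  · exact Nat.sub_lt_sub_left ‹i < cs.length›
      (Nat.lt_of_lt_of_le (Nat.lt_add_of_pos_right (by decide)) (aLine_ge cs (i + 2)))
  · exact Nat.sub_lt_sub_left ‹i < cs.length›
      (Nat.lt_of_lt_of_le
        (lt_min (Nat.lt_of_succ_lt ‹cs.getD i ' ' = '/' ∧ i + 1 < cs.length›.2)
          (Nat.lt_add_of_pos_right (by decide)))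
        (aBlock_ge cs (i + 2)))
  · exact Nat.sub_lt_sub_left ‹i < cs.length› (Nat.lt_succ_self i)
  · exact Nat.sub_lt_sub_left ‹i < cs.length›
      (Nat.lt_of_lt_of_le (Nat.lt_add_of_pos_right (by decide)) (aLine_ge cs (i + 2)))
  · exact Nat.sub_lt_sub_left ‹i < cs.length› (Nat.lt_succ_self i)

def strip_literals_and_comments_py (query : String) : String :=
  String.mk (aMain query.toList 0 [])

-- ===== PORT B =====
-- FSM states: NORMAL (with pending lone '/' or '-'), STRING (quote char, escape flag),
-- LINE comment, BLOCK comment (star = previous char was '*')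
inductive BState where
  | normal : BState
  | pslash : BState
  | pdash : BState
  | instr : Char → Bool → BState
  | line : BState
  | block : Bool → BState
deriving DecidableEq, Repr

-- NORMAL-state handling of one char (the tail of Source B's NORMAL branch)
def stepNormal (c : Char) : BState × List Char :=
  if c = '"' ∨ c = '\'' ∨ c = '`' then (BState.instr c false, [' '])
  else if c = '/' then (BState.pslash, [])
  else if c = '-' then (BState.pdash, [])
  else (BState.normal, [c])

-- one FSM transition: next state and emitted characters
def step : BState → Char → BState × List Char
  | BState.normal, c => stepNormal c
  | BState.pslash, c =>
      if c = '/' then (BState.line, [' '])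
      else if c = '*' then (BState.block false, [' '])
      else let p := stepNormal c; (p.1, '/' :: p.2)
  | BState.pdash, c =>
      if c = '-' then (BState.line, [' '])
      else let p := stepNormal c; (p.1, '-' :: p.2)
  | BState.instr q esc, c =>
      if esc then (BState.instr q false, [])
      else if c = '\\' then (BState.instr q true, [])
      else if c = q then (BState.normal, [])
      else (BState.instr q esc, [])
  | BState.line, c => if c = '\n' ∨ c = '\r' then (BState.normal, [c]) else (BState.line, [])
  | BState.block star, c =>
      if star ∧ c = '/' then (BState.normal, []) else (BState.block (c = '*'), [])

-- end-of-input flush: a still-pending lone '/' or '-' is emitted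
def flushB : BState → List Char
  | BState.pslash => ['/']
  | BState.pdash => ['-']
  | _ => []

def strip_literals_and_comments_py_alt (query : String) : String :=
  String.mk
    ((query.toList.foldl (fun (st : BState × List Char) c =>
        ((step st.1 c).1, st.2 ++ (step st.1 c).2)) (BState.normal, [])).2
      ++ flushB ((query.toList.foldl (fun (st : BState × List Char) c =>
        ((step st.1 c).1, st.2 ++ (step st.1 c).2)) (BState.normal, [])).1))

-- ===== PRECONDITION & SPEC =====
def Spec_strip_literals_and_comments_py (query : String) (out : String) : Prop := out = strip_literals_and_comments_py_alt query
instance (query : String) (out : String) : Decidable (Spec_strip_literals_and_comments_py query out) := by unfold Spec_strip_literals_and_comments_py; infer_instance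

-- ===== CLAIM (what is proved, stated in full; the proofs are below) =====
def Claim_equal_strip_literals_and_comments_py : Prop := ∀ (query : String), Dom_strip_literals_and_comments_py query → Spec_strip_literals_and_comments_py query (strip_literals_and_comments_py query)

-- ===== LEMMAS AND PROOFS =====

-- recursive formulation of B's fold, used by the proofs only
def bGo : BState → List Char → List Char
  | st, [] => flushB st
  | st, c :: r => (step st c).2 ++ bGo (step st c).1 r

theorem bFold_eq_bGo (l : List Char) (st : BState) (out : List Char) :
    (l.foldl (fun (p : BState × List Char) c =>
      ((step p.1 c).1, p.2 ++ (step p.1 c).2)) (st, out)).2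
      ++ flushB (l.foldl (fun (p : BState × List Char) c =>
      ((step p.1 c).1, p.2 ++ (step p.1 c).2)) (st, out)).1
    = out ++ bGo st l := by
  induction l generalizing st out with
  | nil => simp [bGo]
  | cons c r ih => simp only [List.foldl_cons, bGo, ih, List.append_assoc]

theorem drop_cons (cs : List Char) (i : Nat) (h : i < cs.length) :
    cs.drop i = cs.getD i ' ' :: cs.drop (i + 1) := by
  rw [List.getD_eq_getElem cs ' ' h, List.drop_eq_getElem_cons h]

theorem drop_big (cs : List Char) (i : Nat) (h : ¬ i < cs.length) : cs.drop i = [] :=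
  List.drop_eq_nil_of_le (by omega)

-- one-step characterisations of the FSM (c stays a variable so they rewrite cleanly)
theorem stepN_quote (c : Char) (h : c = '"' ∨ c = '\'' ∨ c = '`') :
    step BState.normal c = (BState.instr c false, [' ']) := by
  show stepNormal c = _; rw [stepNormal, if_pos h]

theorem stepN_other (c : Char) (h1 : ¬ (c = '"' ∨ c = '\'' ∨ c = '`'))
    (h2 : c ≠ '/') (h3 : c ≠ '-') : step BState.normal c = (BState.normal, [c]) := by
  show stepNormal c = _; rw [stepNormal, if_neg h1, if_neg h2, if_neg h3]

theorem stepN_slash : step BState.normal '/' = (BState.pslash, []) := by decide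

theorem stepN_dash : step BState.normal '-' = (BState.pdash, []) := by decide

theorem step_pslash_slash : step BState.pslash '/' = (BState.line, [' ']) := by decide

theorem step_pslash_star : step BState.pslash '*' = (BState.block false, [' ']) := by decide

theorem step_pslash_other (c : Char) (h1 : c ≠ '/') (h2 : c ≠ '*') :
    step BState.pslash c = ((stepNormal c).1, '/' :: (stepNormal c).2) := by
  simp only [step, if_neg h1, if_neg h2]

theorem step_pdash_dash : step BState.pdash '-' = (BState.line, [' ']) := by decide

theorem step_pdash_other (c : Char) (h : c ≠ '-') :
    step BState.pdash c = ((stepNormal c).1, '-' :: (stepNormal c).2) := by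
  simp only [step, if_neg h]

theorem step_esc (q c : Char) : step (BState.instr q true) c = (BState.instr q false, []) := by
  simp [step]

theorem step_instr_bs (q : Char) : step (BState.instr q false) '\\' = (BState.instr q true, []) := by
  simp [step]

theorem step_instr_close (q : Char) (h : q ≠ '\\') :
    step (BState.instr q false) q = (BState.normal, []) := by
  simp [step, h]

theorem step_instr_other (q c : Char) (h1 : c ≠ '\\') (h2 : c ≠ q) :
    step (BState.instr q false) c = (BState.instr q false, []) := by
  simp [step, h1, h2]

theorem step_line_nl (c : Char) (h : c = '\n' ∨ c = '\r') :
    step BState.line c = (BState.normal, [c]) := by simp only [step, if_pos h]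

theorem step_line_other (c : Char) (h : ¬ (c = '\n' ∨ c = '\r')) :
    step BState.line c = (BState.line, []) := by simp only [step, if_neg h]

theorem step_block_exit : step (BState.block true) '/' = (BState.normal, []) := by decide

theorem step_block_go (s : Bool) (c : Char) (h : s = true → c ≠ '/') :
    step (BState.block s) c = (BState.block (c = '*'), []) := by
  cases s with
  | false => simp [step]
  | true => simp [step, h rfl]

-- single-transition rewrite forms of bGo (c and q stay variables so `rw` applies them)
theorem bGoN_quote (c : Char) (r : List Char) (h : c = '"' ∨ c = '\'' ∨ c = '`') :
    bGo BState.normal (c :: r) = ' ' :: bGo (BState.instr c false) r := by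
  simp only [bGo, stepN_quote c h]; rfl

theorem bGoN_slash (r : List Char) : bGo BState.normal ('/' :: r) = bGo BState.pslash r := by
  simp only [bGo, stepN_slash]; rfl

theorem bGoN_dash (r : List Char) : bGo BState.normal ('-' :: r) = bGo BState.pdash r := by
  simp only [bGo, stepN_dash]; rfl

theorem bGoN_other (c : Char) (r : List Char) (h1 : ¬ (c = '"' ∨ c = '\'' ∨ c = '`'))
    (h2 : c ≠ '/') (h3 : c ≠ '-') : bGo BState.normal (c :: r) = c :: bGo BState.normal r := by
  simp only [bGo, stepN_other c h1 h2 h3]; rfl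

theorem bGoPS_slash (r : List Char) : bGo BState.pslash ('/' :: r) = ' ' :: bGo BState.line r := by
  simp only [bGo, step_pslash_slash]; rfl

theorem bGoPS_star (r : List Char) :
    bGo BState.pslash ('*' :: r) = ' ' :: bGo (BState.block false) r := by
  simp only [bGo, step_pslash_star]; rfl

theorem bGoPS_other (c : Char) (r : List Char) (h1 : c ≠ '/') (h2 : c ≠ '*') :
    bGo BState.pslash (c :: r) = '/' :: bGo BState.normal (c :: r) := by
  simp only [bGo, step_pslash_other c h1 h2]; rfl

theorem bGoPD_dash (r : List Char) : bGo BState.pdash ('-' :: r) = ' ' :: bGo BState.line r := by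
  simp only [bGo, step_pdash_dash]; rfl

theorem bGoPD_other (c : Char) (r : List Char) (h : c ≠ '-') :
    bGo BState.pdash (c :: r) = '-' :: bGo BState.normal (c :: r) := by
  simp only [bGo, step_pdash_other c h]; rfl

theorem bGoS_esc (q c : Char) (r : List Char) :
    bGo (BState.instr q true) (c :: r) = bGo (BState.instr q false) r := by
  simp only [bGo, step_esc]; rfl

theorem bGoS_bs (q : Char) (r : List Char) :
    bGo (BState.instr q false) ('\\' :: r) = bGo (BState.instr q true) r := by
  simp only [bGo, step_instr_bs]; rfl

theorem bGoS_close (q : Char) (r : List Char) (h : q ≠ '\\') :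
    bGo (BState.instr q false) (q :: r) = bGo BState.normal r := by
  simp only [bGo, step_instr_close q h]; rfl

theorem bGoS_other (q c : Char) (r : List Char) (h1 : c ≠ '\\') (h2 : c ≠ q) :
    bGo (BState.instr q false) (c :: r) = bGo (BState.instr q false) r := by
  simp only [bGo, step_instr_other q c h1 h2]; rfl

theorem bGoL_nl (c : Char) (r : List Char) (h : c = '\n' ∨ c = '\r') :
    bGo BState.line (c :: r) = c :: bGo BState.normal r := by
  simp only [bGo, step_line_nl c h]; rfl

theorem bGoL_other (c : Char) (r : List Char) (h : ¬ (c = '\n' ∨ c = '\r')) :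
    bGo BState.line (c :: r) = bGo BState.line r := by
  simp only [bGo, step_line_other c h]; rfl

theorem bGoB_go (s : Bool) (c : Char) (r : List Char) (h : s = true → c ≠ '/') :
    bGo (BState.block s) (c :: r) = bGo (BState.block (c = '*')) r := by
  simp only [bGo, step_block_go s c h]; rfl

theorem bGoB_exit (r : List Char) : bGo (BState.block true) ('/' :: r) = bGo BState.normal r := by
  simp only [bGo, step_block_exit]; rfl

-- string-literal loop vs STRING state
theorem strLemma (cs : List Char) (q : Char) (i : Nat) :
    bGo (BState.instr q false) (cs.drop i) = bGo BState.normal (cs.drop (aStr cs q i)) := by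
  induction i using aStr.induct cs q with
  | case1 i h h2 ih =>
    rw [aStr, if_pos h, if_pos h2, drop_cons cs i h, h2.1,
      show List.drop (i + 1) cs = cs.getD (i + 1) ' ' :: List.drop (i + 2) cs from
        drop_cons cs (i + 1) h2.2,
      bGoS_bs, bGoS_esc]
    exact ih
  | case2 i h h2 h3 =>
    rw [aStr, if_pos h, if_neg h2, if_pos h3, drop_cons cs i h, h3]
    by_cases hb : q = '\\'
    · have hn : ¬ i + 1 < cs.length := fun hc => h2 ⟨h3.trans hb, hc⟩
      rw [drop_big cs (i + 1) hn]
      subst hb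
      rw [bGoS_bs]
      rfl
    · rw [bGoS_close q _ hb]
  | case3 i h h2 h3 ih =>
    rw [aStr, if_pos h, if_neg h2, if_neg h3, drop_cons cs i h]
    by_cases hb : cs.getD i ' ' = '\\'
    · have hn : ¬ i + 1 < cs.length := fun hc => h2 ⟨hb, hc⟩
      rw [hb, bGoS_bs, drop_big cs (i + 1) hn,
        show aStr cs q (i + 1) = i + 1 from by rw [aStr, if_neg hn],
        drop_big cs (i + 1) hn]
      rfl
    · rw [bGoS_other q _ _ hb h3]
      exact ih
  | case4 i h =>
    rw [aStr, if_neg h]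
    rcases Nat.lt_or_ge i cs.length with hl | hl
    · exact absurd hl h
    · rw [drop_big cs i (by omega)]
      rfl

-- line-comment loop vs LINE state
theorem lineLemma (cs : List Char) (i : Nat) :
    bGo BState.line (cs.drop i) = bGo BState.normal (cs.drop (aLine cs i)) := by
  induction i using aLine.induct cs with
  | case1 i h ih =>
    rw [aLine, if_pos h, drop_cons cs i h.1, bGoL_other _ _ h.2]
    exact ih
  | case2 i h =>
    rw [aLine, if_neg h]
    by_cases hl : i < cs.length
    · have hnl : cs.getD i ' ' = '\n' ∨ cs.getD i ' ' = '\r' := by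
        by_contra hc; exact h ⟨hl, hc⟩
      have hq : ¬ (cs.getD i ' ' = '"' ∨ cs.getD i ' ' = '\'' ∨ cs.getD i ' ' = '`') := by
        rcases hnl with h' | h' <;> rw [h'] <;> decide
      have hs : cs.getD i ' ' ≠ '/' := by rcases hnl with h' | h' <;> rw [h'] <;> decide
      have hd : cs.getD i ' ' ≠ '-' := by rcases hnl with h' | h' <;> rw [h'] <;> decide
      rw [drop_cons cs i hl, bGoL_nl _ _ hnl, bGoN_other _ _ hq hs hd]
    · rw [drop_big cs i hl]
      rfl

-- block-comment loop vs BLOCK state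
theorem blockLemma (cs : List Char) (i : Nat) :
    bGo (BState.block false) (cs.drop i) = bGo BState.normal (cs.drop (aBlock cs i)) := by
  induction i using aBlock.induct cs with
  | case1 i h ih =>
    rw [aBlock, if_pos h]
    obtain ⟨h1, h2⟩ := h
    rw [drop_cons cs i (by omega), ← ih,
      show List.drop (i + 1) cs = cs.getD (i + 1) ' ' :: List.drop (i + 2) cs from
        drop_cons cs (i + 1) h1,
      bGoB_go false _ _ (by simp)]
    by_cases hstar : cs.getD i ' ' = '*'
    · -- star flag set; the next char cannot be '/'
      have hn : cs.getD (i + 1) ' ' ≠ '/' := fun hc => h2 ⟨hstar, hc⟩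
      rw [show (decide (cs.getD i ' ' = '*')) = true from decide_eq_true hstar,
        bGoB_go true _ _ (fun _ => hn), bGoB_go false _ _ (by simp)]
    · rw [show (decide (cs.getD i ' ' = '*')) = false from decide_eq_false hstar,
        bGoB_go false _ _ (by simp)]
  | case2 i h =>
    rw [aBlock, if_neg h]
    by_cases hl : i < cs.length
    · by_cases h1 : i + 1 < cs.length
      · -- terminator "*/" at i: both chars consumed, nothing emitted
        have h2 : cs.getD i ' ' = '*' ∧ cs.getD (i + 1) ' ' = '/' := by
          by_contra hc; exact h ⟨h1, hc⟩
        rw [drop_cons cs i hl, h2.1,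
          show List.drop (i + 1) cs = cs.getD (i + 1) ' ' :: List.drop (i + 2) cs from
            drop_cons cs (i + 1) h1,
          h2.2, show min cs.length (i + 2) = i + 2 from by omega,
          bGoB_go false _ _ (by simp),
          show (decide (('*' : Char) = '*')) = true from by decide, bGoB_exit]
      · -- last char (if any) swallowed; min clamps to length
        rw [show min cs.length (i + 2) = cs.length from by omega,
          drop_big cs cs.length (by omega), drop_cons cs i hl, drop_big cs (i + 1) h1,
          bGoB_go false _ _ (by simp)]
        rfl
    · rw [drop_big cs i hl, drop_big cs (min cs.length (i + 2)) (by omega)]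
      rfl

-- main loop of A vs the FSM from NORMAL state
theorem mainLemma (cs : List Char) (i : Nat) (acc : List Char) :
    aMain cs i acc = acc ++ bGo BState.normal (cs.drop i) := by
  induction i, acc using aMain.induct cs with
  | case1 i acc h h1 ih =>
    rw [aMain, if_pos h, if_pos h1, ih, drop_cons cs i h, bGoN_quote _ _ h1, strLemma]
    simp
  | case2 i acc h h1 h2 h3 ih =>
    rw [aMain, if_pos h, if_neg h1, if_pos h2, if_pos h3, ih, drop_cons cs i h, h2.1,
      show List.drop (i + 1) cs = cs.getD (i + 1) ' ' :: List.drop (i + 2) cs from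
        drop_cons cs (i + 1) h2.2,
      h3, bGoN_slash, bGoPS_slash, lineLemma]
    simp
  | case3 i acc h h1 h2 h3 h4 ih =>
    rw [aMain, if_pos h, if_neg h1, if_pos h2, if_neg h3, if_pos h4, ih, drop_cons cs i h, h2.1,
      show List.drop (i + 1) cs = cs.getD (i + 1) ' ' :: List.drop (i + 2) cs from
        drop_cons cs (i + 1) h2.2,
      h4, bGoN_slash, bGoPS_star, blockLemma]
    simp
  | case4 i acc h h1 h2 h3 h4 ih =>
    rw [aMain, if_pos h, if_neg h1, if_pos h2, if_neg h3, if_neg h4, ih, drop_cons cs i h, h2.1,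
      bGoN_slash,
      show List.drop (i + 1) cs = cs.getD (i + 1) ' ' :: List.drop (i + 2) cs from
        drop_cons cs (i + 1) h2.2,
      bGoPS_other _ _ h3 h4,
      ← show List.drop (i + 1) cs = cs.getD (i + 1) ' ' :: List.drop (i + 2) cs from
        drop_cons cs (i + 1) h2.2]
    simp
  | case5 i acc h h1 h2 h3 ih =>
    rw [aMain, if_pos h, if_neg h1, if_neg h2, if_pos h3, ih, drop_cons cs i h, h3.1,
      show List.drop (i + 1) cs = cs.getD (i + 1) ' ' :: List.drop (i + 2) cs from
        drop_cons cs (i + 1) h3.2.1,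
      h3.2.2, bGoN_dash, bGoPD_dash, lineLemma]
    simp
  | case6 i acc h h1 h2 h3 ih =>
    rw [aMain, if_pos h, if_neg h1, if_neg h2, if_neg h3, ih, drop_cons cs i h]
    by_cases hs : cs.getD i ' ' = '/'
    · -- lone '/' at the very end of the input
      have hn : ¬ i + 1 < cs.length := fun hc => h2 ⟨hs, hc⟩
      rw [drop_big cs (i + 1) hn, hs, bGoN_slash]
      simp [bGo, flushB]
    · by_cases hd : cs.getD i ' ' = '-'
      · by_cases hn : i + 1 < cs.length
        · -- lone '-' followed by a non-dash char
          have hnd : cs.getD (i + 1) ' ' ≠ '-' := fun hc => h3 ⟨hd, hn, hc⟩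
          rw [hd, bGoN_dash,
            show List.drop (i + 1) cs = cs.getD (i + 1) ' ' :: List.drop (i + 2) cs from
              drop_cons cs (i + 1) hn,
            bGoPD_other _ _ hnd,
            ← show List.drop (i + 1) cs = cs.getD (i + 1) ' ' :: List.drop (i + 2) cs from
              drop_cons cs (i + 1) hn]
          simp
        · -- lone '-' at the very end of the input
          rw [drop_big cs (i + 1) hn, hd, bGoN_dash]
          simp [bGo, flushB]
      · -- ordinary character: emitted as-is by both
        rw [bGoN_other _ _ h1 hs hd]
        simp
  | case7 i acc h =>
    rw [aMain, if_neg h, drop_big cs i h]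
    simp [bGo, flushB]

-- ===== VERDICT (by name: the statement is the Claim_ definition above) =====
theorem strip_literals_and_comments_py_spec : Claim_equal_strip_literals_and_comments_py := by
  intro query _
  show _ = _
  have h := bFold_eq_bGo query.toList BState.normal []
  simp only [List.nil_append] at h
  unfold strip_literals_and_comments_py strip_literals_and_comments_py_alt
  rw [mainLemma, List.drop_zero, List.nil_append, ← h]
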